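-- pv_equiv track=rewrite | github.com/pypi-data/pypi-mirror-379 | packages/upas/upas-1.0.0-py3-none-any.whl/upas/analysis/pattern.py | _find_common_prefix_strict
-- ===== SOURCE A (Python) =====
-- from typing import List, Dict, Any
--
-- def _find_common_prefix_strict(payloads: List[str]) -> str:
--     """Find common prefix using strict iterative algorithm."""
--     if not payloads or len(payloads) < 2:
--         return ""
--
--     min_len = min(len(p) for p in payloads if p)
--     if min_len < 4:  # Minimum 2 bytes = 4 hex chars
--         return ""
--
--     # Start with 2 bytes (4 hex chars) from first payload
--     pattern_len = 4
--
--     while pattern_len <= min_len: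
--         # Get pattern from first payload
--         pattern = payloads[0][:pattern_len]
--
--         # Check if ALL payloads have this exact prefix
--         all_match = all(p.startswith(pattern) for p in payloads)
--
--         if all_match:
--             # All match, try with one more byte (2 hex chars)
--             pattern_len += 2
--             # Safety limit: don't go beyond 32 hex chars (16 bytes)
--             if pattern_len > 32:
--                 break
--         else:
--             # Not all match
--             if pattern_len == 4:
--                 # We're still at 2 bytes and it doesn't work
--                 return ""  # No prefix
--             else:
--                 # Return pattern minus 1 byte (previous working pattern)
--                 return payloads[0][: pattern_len - 2]
--
--     # If we exit the loop, return the last working pattern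
--     return payloads[0][: pattern_len - 2] if pattern_len > 4 else ""
-- ===== SOURCE B (Python) =====
-- from typing import List
--
--
-- def _find_common_prefix_strict(payloads: List[str]) -> str:
--     """Single-pass fold: shrink a common prefix over all payloads, then round
--     its length down to an even number, cap at 32, and require >= 4."""
--     if not payloads or len(payloads) < 2:
--         return ""
--
--     min_len = min(len(p) for p in payloads if p)
--     if min_len < 4:
--         return ""
--
--     prefix = payloads[0]
--     for p in payloads[1:]:
--         i = 0
--         m = min(len(prefix), len(p))
--         while i < m and prefix[i] == p[i]:
--             i += 1
--         prefix = prefix[:i]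
--
--     c = len(prefix)
--     r = min(c - c % 2, 32)
--     return payloads[0][:r] if r >= 4 else ""
-- ===== Notes on version B (the rewrite author's own statement) =====
-- stated objective: simpler
-- what changed: Replaces A's growing while-loop that rescans all payloads with all(startswith) at each even length by a single fold computing the exact common prefix char-by-char, then one arithmetic step (round length down to even, cap at 32, require >= 4).
import Mathlib
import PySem

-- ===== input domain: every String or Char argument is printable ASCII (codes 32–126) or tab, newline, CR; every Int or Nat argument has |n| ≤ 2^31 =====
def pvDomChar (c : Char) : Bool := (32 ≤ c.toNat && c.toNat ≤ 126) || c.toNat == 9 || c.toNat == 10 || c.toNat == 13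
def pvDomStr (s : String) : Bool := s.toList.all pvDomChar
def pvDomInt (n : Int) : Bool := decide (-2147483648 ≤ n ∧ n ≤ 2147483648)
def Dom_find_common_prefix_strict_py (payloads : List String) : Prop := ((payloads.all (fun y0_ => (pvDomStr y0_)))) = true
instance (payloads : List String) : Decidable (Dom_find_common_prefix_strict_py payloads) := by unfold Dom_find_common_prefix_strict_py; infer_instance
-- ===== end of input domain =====

-- B replaces A's repeated all(startswith) rescans at growing even lengths by one fold
-- computing the exact common prefix, then a single arithmetic step (objective: simpler).

-- ===== PORT A =====
-- the while loop of A; fuel bounds the iteration count (min_len iterations always suffice)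
def pvLoopA (pls : List (List Char)) (first : List Char) (min_len : Nat) : Nat → Nat → String
  | fuel, L =>
    if L ≤ min_len then
      match fuel with
      | 0 => ""  -- unreachable with the fuel the port supplies
      | fuel' + 1 =>
        let pattern := first.take L
        if pls.all (fun p => pattern.isPrefixOf p) then
          if 32 < L + 2 then String.ofList (first.take L)  -- break, then post-loop return
          else pvLoopA pls first min_len fuel' (L + 2)
        else if L = 4 then "" else String.ofList (first.take (L - 2))
    else
      if 4 < L then String.ofList (first.take (L - 2)) else ""

def find_common_prefix_strict_py (payloads : List String) : String :=
  if payloads.isEmpty ∨ payloads.length < 2 then ""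
  else
    match PySem.List.min? ((payloads.filter (fun p => !p.isEmpty)).map (fun p => p.toList.length)) (fun x => x) with
    | none => ""  -- Python raises ValueError here; excluded by Pre_
    | some min_len =>
      if min_len < 4 then ""
      else pvLoopA (payloads.map String.toList) ((payloads.headD "").toList) min_len min_len 4

-- ===== PORT B =====
-- char-by-char longest common prefix of two strings (Source B's inner while loop)
def pvCp : List Char → List Char → List Char
  | x :: xs, y :: ys => if x = y then x :: pvCp xs ys else []
  | _, _ => []

def find_common_prefix_strict_py_alt (payloads : List String) : String :=
  if payloads.length < 2 then ""
  else
    match PySem.List.min? ((payloads.filter (fun p => !p.isEmpty)).map (fun p => p.toList.length)) (fun x => x) with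
    | none => ""  -- Python raises ValueError here; excluded by Pre_
    | some mn =>
      if mn < 4 then ""
      else
        match payloads.map String.toList with
        | [] => ""  -- unreachable: payloads has ≥ 2 elements
        | first :: rest =>
          let c := (rest.foldl pvCp first).length
          let r := min (c - c % 2) 32
          if 4 ≤ r then String.ofList (first.take r) else ""

-- ===== PRECONDITION & SPEC =====
-- Pre_ excludes exactly the inputs where A raises: lists of ≥ 2 payloads that are all
-- empty strings, on which Python's min() of an empty generator raises ValueError (B,
-- using the same guard, raises there too).
def Pre_find_common_prefix_strict_py (payloads : List String) : Prop :=
  payloads.length < 2 ∨ payloads.any (fun p => !p.isEmpty) = true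
instance (payloads : List String) : Decidable (Pre_find_common_prefix_strict_py payloads) := by
  unfold Pre_find_common_prefix_strict_py; infer_instance

def pvWitness_find_common_prefix_strict_py : List String := ["deadbeef", "deadbe01"]

def Spec_find_common_prefix_strict_py (payloads : List String) (out : String) : Prop := out = find_common_prefix_strict_py_alt payloads
instance (payloads : List String) (out : String) : Decidable (Spec_find_common_prefix_strict_py payloads out) := by unfold Spec_find_common_prefix_strict_py; infer_instance

-- ===== CLAIM (what is proved, stated in full; the proofs are below) =====
def Claim_equal_find_common_prefix_strict_py : Prop := ∀ (payloads : List String), Dom_find_common_prefix_strict_py payloads → Pre_find_common_prefix_strict_py payloads → Spec_find_common_prefix_strict_py payloads (find_common_prefix_strict_py payloads)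

-- ===== LEMMAS AND PROOFS =====

lemma pvCp_length_iff : ∀ (a b : List Char) (L : Nat),
    L ≤ (pvCp a b).length ↔ L ≤ a.length ∧ L ≤ b.length ∧ a.take L = b.take L := by
  intro a
  induction a with
  | nil => intro b L; simp [pvCp]; omega
  | cons x xs ih =>
    intro b L
    cases b with
    | nil => simp [pvCp]; omega
    | cons y ys =>
      by_cases hxy : x = y
      · subst hxy
        cases L with
        | zero => simp [pvCp]
        | succ L' =>
          simp [pvCp]
          exact ih ys L'
      · cases L with
        | zero => simp [pvCp, hxy]
        | succ L' => simp [pvCp, hxy]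

lemma pvCp_prefix : ∀ (a b : List Char), pvCp a b <+: a := by
  intro a
  induction a with
  | nil => intro b; cases b <;> simp [pvCp]
  | cons x xs ih =>
    intro b
    cases b with
    | nil => simp [pvCp]
    | cons y ys =>
      by_cases hxy : x = y
      · simpa [pvCp, hxy] using ih ys
      · simp [pvCp, hxy]

lemma prefix_take_eq {c a : List Char} (h : c <+: a) {L : Nat} (hL : L ≤ c.length) :
    c.take L = a.take L := by
  obtain ⟨t, rfl⟩ := h
  rw [List.take_append]
  have : L - c.length = 0 := by omega
  simp [this]

lemma fold_cp_iff : ∀ (rest : List (List Char)) (acc : List Char) (L : Nat),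
    L ≤ (rest.foldl pvCp acc).length ↔
      L ≤ acc.length ∧ ∀ p ∈ rest, L ≤ p.length ∧ acc.take L = p.take L := by
  intro rest
  induction rest with
  | nil => intro acc L; simp
  | cons p rest ih =>
    intro acc L
    rw [List.foldl_cons, ih]
    constructor
    · rintro ⟨h1, h2⟩
      have h3 := (pvCp_length_iff acc p L).mp h1
      refine ⟨h3.1, ?_⟩
      intro q hq
      rcases List.mem_cons.mp hq with rfl | hq
      · exact ⟨h3.2.1, h3.2.2⟩
      · have := h2 q hq
        exact ⟨this.1, by rw [← prefix_take_eq (pvCp_prefix acc p) h1]; exact this.2⟩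
    · rintro ⟨h1, h2⟩
      have hp := h2 p (by simp)
      have hcp : L ≤ (pvCp acc p).length := (pvCp_length_iff acc p L).mpr ⟨h1, hp.1, hp.2⟩
      refine ⟨hcp, ?_⟩
      intro q hq
      have := h2 q (by simp [hq])
      exact ⟨this.1, by rw [prefix_take_eq (pvCp_prefix acc p) hcp]; exact this.2⟩

lemma all_startswith_iff (first : List Char) (rest : List (List Char)) (L : Nat)
    (hL : L ≤ first.length) :
    ((first :: rest).all (fun p => (first.take L).isPrefixOf p) = true) ↔
      L ≤ (rest.foldl pvCp first).length := by
  rw [fold_cp_iff]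
  simp only [List.all_cons, List.all_eq_true, Bool.and_eq_true, List.isPrefixOf_iff_prefix]
  constructor
  · rintro ⟨-, h2⟩
    refine ⟨hL, ?_⟩
    intro p hp
    obtain ⟨t, ht⟩ := h2 p hp
    constructor
    · have : (first.take L).length ≤ p.length := by
        rw [← ht]; simp
      simpa [Nat.min_eq_left hL] using this
    · rw [← ht, List.take_append]
      have hlen : (first.take L).length = L := by simp [Nat.min_eq_left hL]
      have : L - (first.take L).length = 0 := by omega
      simp [hlen]
  · rintro ⟨-, h2⟩
    constructor
    · exact ⟨first.drop L, by simp⟩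
    · intro p hp
      have := h2 p hp
      refine ⟨p.drop L, ?_⟩
      rw [this.2]
      simp

lemma loopA_empty (pls : List (List Char)) (min_len : Nat) :
    ∀ fuel L, pvLoopA pls [] min_len fuel L = "" := by
  intro fuel
  induction fuel with
  | zero =>
    intro L
    unfold pvLoopA
    by_cases h : L ≤ min_len
    · rw [if_pos h]
    · rw [if_neg h]
      split
      · rw [List.take_nil]
      · rfl
  | succ fuel' ih =>
    intro L
    unfold pvLoopA
    by_cases h : L ≤ min_len
    · rw [if_pos h]
      simp only [List.take_nil]
      split
      · split
        · decide
        · exact ih (L + 2)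
      · split
        · rfl
        · decide
    · rw [if_neg h]
      split
      · rw [List.take_nil]
      · rfl

lemma fold_cp_nil_acc : ∀ (rest : List (List Char)), rest.foldl pvCp [] = [] := by
  intro rest
  induction rest with
  | nil => rfl
  | cons p rest ih => simpa [pvCp] using ih

lemma loopA_eq (first : List Char) (rest : List (List Char)) (min_len : Nat)
    (hmf : min_len ≤ first.length) (hm4 : 4 ≤ min_len)
    (hKm : (rest.foldl pvCp first).length ≤ min_len) :
    ∀ fuel L, L % 2 = 0 → 4 ≤ L → L ≤ 32 →
      (L = 4 ∨ L - 2 ≤ (rest.foldl pvCp first).length) →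
      min_len + 2 ≤ fuel + L →
      pvLoopA (first :: rest) first min_len fuel L =
        (if 4 ≤ min ((rest.foldl pvCp first).length - (rest.foldl pvCp first).length % 2) 32
         then String.ofList (first.take (min ((rest.foldl pvCp first).length - (rest.foldl pvCp first).length % 2) 32))
         else "") := by
  set K := (rest.foldl pvCp first).length with hK
  intro fuel
  induction fuel with
  | zero =>
    intro L hev h4 h32 hinv hfuel
    have hgt : ¬ L ≤ min_len := by omega
    have hL2 : L - 2 ≤ K := by rcases hinv with h | h <;> omega
    have hKe : K = L - 2 := by omega
    have hmin : min (K - K % 2) 32 = L - 2 := by omega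
    unfold pvLoopA
    rw [if_neg hgt, hmin, if_pos (by omega : (4:Nat) ≤ L - 2)]
    rw [if_pos (by omega : 4 < L)]
  | succ fuel' ih =>
    intro L hev h4 h32 hinv hfuel
    unfold pvLoopA
    by_cases hle : L ≤ min_len
    · rw [if_pos hle]
      simp only []
      have hall := all_startswith_iff first rest L (by omega)
      by_cases hmatch : L ≤ K
      · rw [if_pos (hall.mpr hmatch)]
        by_cases hbrk : 32 < L + 2
        · rw [if_pos hbrk]
          have hL32 : L = 32 := by omega
          have hmin : min (K - K % 2) 32 = 32 := by omega
          rw [hmin, if_pos (by omega : (4:Nat) ≤ 32), hL32]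
        · rw [if_neg hbrk]
          exact ih (L + 2) (by omega) (by omega) (by omega) (by omega) (by omega)
      · rw [if_neg (fun h => hmatch (hall.mp h))]
        by_cases hL4 : L = 4
        · rw [if_pos hL4]
          have hmin : min (K - K % 2) 32 < 4 := by omega
          rw [if_neg (by omega)]
        · rw [if_neg hL4]
          have hL2 : L - 2 ≤ K := by rcases hinv with h | h <;> omega
          have hmin : min (K - K % 2) 32 = L - 2 := by omega
          rw [hmin, if_pos (by omega : (4:Nat) ≤ L - 2)]
    · rw [if_neg hle]
      have hL2 : L - 2 ≤ K := by rcases hinv with h | h <;> omega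
      have hmin : min (K - K % 2) 32 = L - 2 := by omega
      rw [hmin, if_pos (by omega : (4:Nat) ≤ L - 2), if_pos (by omega : 4 < L)]

-- ===== VERDICT (by name: the statement is the Claim_ definition above) =====
theorem find_common_prefix_strict_py_spec : Claim_equal_find_common_prefix_strict_py := by
  intro payloads _ hpre
  unfold Spec_find_common_prefix_strict_py
  unfold find_common_prefix_strict_py find_common_prefix_strict_py_alt
  by_cases hlen : payloads.length < 2
  · rw [if_pos (Or.inr hlen), if_pos hlen]
  · have hguard : ¬ (payloads.isEmpty ∨ payloads.length < 2) := by
      rintro (h | h)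
      · rw [List.isEmpty_iff] at h
        subst h
        simp at hlen
      · exact hlen h
    rw [if_neg hguard, if_neg hlen]
    obtain ⟨s0, t, rfl⟩ : ∃ s0 t, payloads = s0 :: t := by
      cases payloads with
      | nil => simp at hlen
      | cons a b => exact ⟨a, b, rfl⟩
    have hany : (s0 :: t).any (fun p => !p.isEmpty) = true := by
      rcases hpre with h | h
      · exact absurd h hlen
      · exact h
    obtain ⟨q, hqmem, hqne⟩ := List.any_eq_true.mp hany
    have hqfil : q ∈ (s0 :: t).filter (fun p => !p.isEmpty) := List.mem_filter.mpr ⟨hqmem, hqne⟩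
    set ml := ((s0 :: t).filter (fun p => !p.isEmpty)).map (fun p => p.toList.length) with hml
    have hmlne : ml ≠ [] := by
      intro h
      rw [hml] at h
      simp only [List.map_eq_nil_iff] at h
      rw [h] at hqfil
      simp at hqfil
    obtain ⟨mn, hmn⟩ : ∃ mn, PySem.List.min? ml (fun x => x) = some mn := by
      cases h : PySem.List.min? ml (fun x => x) with
      | none => exact absurd ((PySem.List.min?_eq_none_iff ml (fun x => x)).mp h) hmlne
      | some mn => exact ⟨mn, rfl⟩
    simp only [hmn]
    by_cases hmn4 : mn < 4
    · rw [if_pos hmn4, if_pos hmn4]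
    · rw [if_neg hmn4, if_neg hmn4]
      have hmin_le : ∀ y ∈ ml, mn ≤ y := by
        intro y hy
        exact PySem.List.min?_isMin hmn y hy
      by_cases hs0 : s0.isEmpty
      · -- first payload empty: A's loop always matches on the empty pattern and returns "",
        -- B's fold collapses the prefix to []
        have hs0l : s0.toList = [] := by
          have : s0 = "" := String.isEmpty_toSlice_iff.mp hs0
          simp [this]
        simp only [List.map_cons, List.headD_cons, hs0l]
        rw [loopA_empty]
        rw [fold_cp_nil_acc]
        simp
      · have hs0fil : s0 ∈ (s0 :: t).filter (fun p => !p.isEmpty) :=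
          List.mem_filter.mpr ⟨by simp, by simp [hs0]⟩
        have hmf : mn ≤ s0.toList.length := by
          apply hmin_le
          rw [hml]
          exact List.mem_map.mpr ⟨s0, hs0fil, rfl⟩
        simp only [List.map_cons, List.headD_cons]
        set first := s0.toList with hfirst
        set rest := t.map String.toList with hrest
        set K := (rest.foldl pvCp first).length with hKdef
        have hKfacts := (fold_cp_iff rest first K).mp (le_refl K)
        have hKm : K ≤ mn := by
          obtain ⟨p, hpfil, hplen⟩ := List.mem_map.mp (PySem.List.min?_mem hmn)
          have hpmem : p ∈ s0 :: t := (List.mem_filter.mp hpfil).1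
          rcases List.mem_cons.mp hpmem with rfl | hpmem
          · rw [← hplen]; exact hKfacts.1
          · rw [← hplen]
            exact (hKfacts.2 p.toList (List.mem_map.mpr ⟨p, hpmem, rfl⟩)).1
        rw [loopA_eq first rest mn hmf (by omega) hKm mn 4 (by omega) (by omega) (by omega)
          (Or.inl rfl) (by omega)]
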